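-- pv_equiv track=rewrite | github.com/amrMahmoud19/ProblemSolving | CountSurvivors.py | survivors
-- ===== SOURCE A (Python) =====
-- def contain_integer(arr):
-- # ascii values for digits from 1-9 are 49-57
--     for i in range(len(arr)):
--
--         char_ascii = ord(arr[i])
--         if char_ascii >= 49 and char_ascii <=57:
--             return char_ascii - 48, i
--     return -1,-1
--
-- def count_person(arr):
-- # Ascii for character P is 80
--     no_persons = 0
--     for i in range(len(arr)):
--         for j in range(len(arr[i])):
--             if ord(arr[i][j]) == 80:
--                 no_persons+=1
--     return no_persons
--
-- def kill_person(arr, no_killed):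
--     for i in range(len(arr)):
--         if ord(arr[i]) == 80:
--             no_killed+=1
--     return no_killed
--
-- def survivors(arr):
--
--     no_killed = 0
--
--     for i in range(len(arr)):
--
--         bomb_radius, bomb_index = contain_integer(arr[i])                   # arr[i] is the cell containing the bomb
--
--         if bomb_radius != -1:                                               # if there is a bomb found in the current cell
--
--             for j in range(bomb_radius):
--                 if j!=0:                                                    # counting the number of killed people in the other cells due to the bomb in the current cell
--                     if i-j >= 0:                                            # checking if cell is within array bounds
--                         no_killed =  kill_person(arr[i-j], no_killed)
--
--                     if i+j < len(arr):                                      # chechking if cell within array bounds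
--                         no_killed = kill_person(arr[i+j], no_killed)
--
--                 else:                                                       # counting the number of killed people in the current cell due to the bomb
--                     if bomb_index-j >=0:
--                         no_killed+=1
--                     if bomb_index+j < len(arr[i]):
--                         no_killed+=1
--
--     return count_person(arr) - no_killed                                    # no of survivors is: the number of killed people + all the people found in the array
-- ===== SOURCE B (Python) =====
-- def survivors(arr):
--     n = len(arr)
--     row_counts = [row.count('P') for row in arr]
--     pre = [0]
--     for c in row_counts:
--         pre.append(pre[-1] + c)
--     no_killed = 0
--     for i, row in enumerate(arr):
--         radius = next((ord(c) - 48 for c in row if '1' <= c <= '9'), 0)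
--         if radius:
--             hi = min(n, i + radius)
--             lo = max(0, i - radius + 1)
--             no_killed += pre[hi] - pre[lo] - row_counts[i] + 2
--     return pre[n] - no_killed
-- ===== Notes on version B (the rewrite author's own statement) =====
-- stated objective: alternative
-- what changed: B precomputes per-row 'P' counts and their prefix sums once, so each bomb's damage becomes a constant number of table lookups (pre[hi]-pre[lo]-rc[i]+2) instead of A's per-bomb rescans of up to 2*(radius-1) neighbouring rows plus a full final recount; measured ~1.4x on generated inputs, below the 1.5x bar, so no speed is claimed.
import Mathlib
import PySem

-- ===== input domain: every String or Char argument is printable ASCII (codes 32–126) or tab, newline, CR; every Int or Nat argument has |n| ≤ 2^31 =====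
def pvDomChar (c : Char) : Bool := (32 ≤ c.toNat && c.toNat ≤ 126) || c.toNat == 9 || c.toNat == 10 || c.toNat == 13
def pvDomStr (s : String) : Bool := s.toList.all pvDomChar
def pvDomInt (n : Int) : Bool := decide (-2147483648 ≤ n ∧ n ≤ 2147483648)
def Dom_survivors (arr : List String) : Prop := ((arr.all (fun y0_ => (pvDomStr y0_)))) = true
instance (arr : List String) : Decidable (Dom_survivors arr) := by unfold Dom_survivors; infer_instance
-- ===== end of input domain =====

-- B replaces A's per-bomb rescans of neighbouring rows by one precomputed prefix-sum table of
-- per-row 'P' counts, turning each bomb's inner loop into a constant number of lookups.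

-- ===== PORT A =====
-- contain_integer: scan for first digit 1-9, return (value, index) or (-1,-1)
def containInteger : List Char → Int → Int × Int
  | [], _ => (-1, -1)
  | c :: rest, i =>
      if 49 ≤ c.toNat ∧ c.toNat ≤ 57 then ((c.toNat : Int) - 48, i)
      else containInteger rest (i + 1)

-- count_person: nested loops counting 'P' (ord 80)
def countPerson (arr : List String) : Int :=
  arr.foldl (fun acc s => s.toList.foldl (fun a c => if c.toNat = 80 then a + 1 else a) acc) 0

-- kill_person: add number of 'P' in one row to no_killed
def killPerson (s : List Char) (k : Int) : Int :=
  s.foldl (fun a c => if c.toNat = 80 then a + 1 else a) k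

def survivors (arr : List String) : Int :=
  let n := arr.length
  -- indices i, j stay Nats (range indices); 'arr[i-j]' is taken under the guard i-j ≥ 0, so
  -- Nat subtraction agrees with Python there
  let noKilled := (List.range n).foldl (fun acc (i : Nat) =>
    let row := arr.getD i ""
    let p := containInteger row.toList 0
    if p.1 ≠ -1 then
      (List.range p.1.toNat).foldl (fun acc2 (j : Nat) =>
        if j ≠ 0 then
          let acc3 := if (i : Int) - (j : Int) ≥ 0 then killPerson (arr.getD (i - j) "").toList acc2 else acc2
          if i + j < n then killPerson (arr.getD (i + j) "").toList acc3 else acc3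
        else
          let acc3 := if p.2 - (j : Int) ≥ 0 then acc2 + 1 else acc2
          if p.2 + (j : Int) < (row.toList.length : Int) then acc3 + 1 else acc3) acc
    else acc) 0
  countPerson arr - noKilled

-- ===== PORT B =====
-- row.count('P') for a one-character needle is exactly the character count
def rowCountP (row : String) : Int := (row.toList.count 'P' : Int)

-- the prefix-sum list built by Source B's append loop
def buildPre (rc : List Int) : List Int :=
  rc.foldl (fun p c => p ++ [p.getLastD 0 + c]) [0]

def survivors_alt (arr : List String) : Int :=
  let n := arr.length
  let rc := arr.map rowCountP
  let pre := buildPre rc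
  let noKilled := (PySem.List.enumerate arr 0).foldl (fun acc pr =>
    let radius : Int :=
      match pr.2.toList.find? (fun c => decide ('1' ≤ c ∧ c ≤ '9')) with
      | some c => (c.toNat : Int) - 48
      | none => 0
    if radius ≠ 0 then
      let hi := min (n : Int) (pr.1 + radius)
      let lo := max 0 (pr.1 - radius + 1)
      acc + PySem.List.pyGetD pre hi 0 - PySem.List.pyGetD pre lo 0
          - PySem.List.pyGetD rc pr.1 0 + 2
    else acc) 0
  PySem.List.pyGetD pre (n : Int) 0 - noKilled

-- ===== PRECONDITION & SPEC =====
def Spec_survivors (arr : List String) (out : Int) : Prop := out = survivors_alt arr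
instance (arr : List String) (out : Int) : Decidable (Spec_survivors arr out) := by unfold Spec_survivors; infer_instance

-- ===== CLAIM (what is proved, stated in full; the proofs are below) =====
def Claim_equal_survivors : Prop := ∀ (arr : List String), Dom_survivors arr → Spec_survivors arr (survivors arr)

-- ===== LEMMAS AND PROOFS =====
-- proof-only helpers: T = prefix sum, gRow = per-cell kill contribution of one bomb,
-- radiusOf/K = radius of the bomb (if any) in a row and its total kill count
def T (rc : List Int) (k : Nat) : Int := (rc.take k).sum

def gRow (rc : List Int) (i j : Nat) : Int :=
  if j = 0 then 2
  else (if j ≤ i then rc.getD (i - j) 0 else 0) +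
       (if i + j < rc.length then rc.getD (i + j) 0 else 0)

def radiusOf (row : String) : Int :=
  match row.toList.find? (fun c => decide ('1' ≤ c ∧ c ≤ '9')) with
  | some c => (c.toNat : Int) - 48
  | none => 0

def K (arr : List String) (i : Nat) : Int :=
  if radiusOf (arr.getD i "") ≠ 0 then
    2 + T (arr.map rowCountP) (min arr.length (i + (radiusOf (arr.getD i "")).toNat))
      - T (arr.map rowCountP) (i + 1 - (radiusOf (arr.getD i "")).toNat)
      - (arr.map rowCountP).getD i 0
  else 0

theorem char80 (c : Char) : (c.toNat = 80) ↔ (c = 'P') := by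
  constructor
  · intro h
    have hv : c.val.toNat = 80 := h
    have : c.val = 80 := by apply UInt32.toNat_inj.mp; simpa using hv
    exact Char.ext_iff.mpr (by simpa using this)
  · intro h; subst h; rfl

theorem digit_pred (c : Char) :
    (decide ('1' ≤ c ∧ c ≤ '9')) = (decide (49 ≤ c.toNat ∧ c.toNat ≤ 57)) := by
  have h1 : ('1' ≤ c) ↔ (49 ≤ c.toNat) := by rw [Char.le_def, UInt32.le_iff_toNat_le]; exact Iff.rfl
  have h2 : (c ≤ '9') ↔ (c.toNat ≤ 57) := by rw [Char.le_def, UInt32.le_iff_toNat_le]; exact Iff.rfl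
  simp only [decide_eq_decide]
  exact and_congr h1 h2

theorem killPerson_eq (l : List Char) (k : Int) : killPerson l k = k + (l.count 'P' : Int) := by
  induction l generalizing k with
  | nil => simp [killPerson]
  | cons c l ih =>
    simp only [killPerson, List.foldl_cons] at *
    rw [ih]
    by_cases h : c.toNat = 80
    · rw [if_pos h, List.count_cons]
      have : (c == 'P') = true := by simp [(char80 c).mp h]
      simp [this]; ring
    · rw [if_neg h, List.count_cons]
      have : (c == 'P') = false := by
        simp only [beq_eq_false_iff_ne, ne_eq]
        intro hc; exact h (by rw [hc]; rfl)
      simp [this]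

theorem ci_fst (l : List Char) (i0 : Int) :
    (containInteger l i0).1 =
      (match l.find? (fun c => decide ('1' ≤ c ∧ c ≤ '9')) with
        | some c => (c.toNat : Int) - 48
        | none => -1) := by
  induction l generalizing i0 with
  | nil => rfl
  | cons c l ih =>
    rw [List.find?_cons]
    by_cases h : 49 ≤ c.toNat ∧ c.toNat ≤ 57
    · have hp : (decide ('1' ≤ c ∧ c ≤ '9')) = true := by rw [digit_pred]; exact decide_eq_true h
      simp [containInteger, h, hp]
    · have hp : (decide ('1' ≤ c ∧ c ≤ '9')) = false := by rw [digit_pred]; exact decide_eq_false h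
      simp [containInteger, h, hp, ih]

theorem ci_bounds (l : List Char) (i0 : Int) (h : (containInteger l i0).1 ≠ -1) :
    i0 ≤ (containInteger l i0).2 ∧ (containInteger l i0).2 < i0 + l.length := by
  induction l generalizing i0 with
  | nil => exact absurd rfl h
  | cons c l ih =>
    by_cases hc : 49 ≤ c.toNat ∧ c.toNat ≤ 57
    · simp only [containInteger, if_pos hc]
      constructor <;> simp
    · simp only [containInteger, if_neg hc] at h ⊢
      have := ih (i0 + 1) h
      simp only [List.length_cons]
      push_cast
      omega

theorem T_succ (rc : List Int) (k : Nat) (hk : k < rc.length) :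
    T rc (k+1) = T rc k + rc.getD k 0 := by
  unfold T
  rw [List.sum_take_succ _ _ hk]
  simp [List.getD_eq_getElem?_getD, List.getElem?_eq_getElem hk]

theorem buildPre_eq (rc : List Int) :
    buildPre rc = (List.range (rc.length + 1)).map (T rc) := by
  induction rc using List.reverseRecOn with
  | nil => simp [buildPre, T]
  | append_singleton rc c ih =>
    have hstep : buildPre (rc ++ [c]) = buildPre rc ++ [(buildPre rc).getLastD 0 + c] := by
      unfold buildPre
      rw [List.foldl_append]
      simp
    rw [hstep, ih]
    have hlast : (((List.range (rc.length + 1)).map (T rc)).getLastD 0) = T rc rc.length := by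
      rw [List.range_succ, List.map_append]
      simp
    rw [hlast]
    rw [List.length_append, List.length_singleton]
    rw [show rc.length + 1 + 1 = (rc.length + 1) + 1 from rfl, List.range_succ (n := rc.length + 1),
        List.map_append]
    congr 1
    · apply List.map_congr_left
      intro k hk
      rw [List.mem_range] at hk
      unfold T
      rw [List.take_append_of_le_length (by omega)]
    · simp only [List.map_cons, List.map_nil, List.cons.injEq, and_true]
      unfold T
      rw [List.take_of_length_le (by simp)]
      simp

theorem pre_getD (rc : List Int) (k : Nat) (hk : k ≤ rc.length) :
    (buildPre rc).getD k 0 = T rc k := by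
  rw [buildPre_eq, List.getD_eq_getElem?_getD, List.getElem?_map,
      List.getElem?_range (by omega)]
  rfl

theorem sumG (rc : List Int) (i : Nat) (hi : i < rc.length) :
    ∀ m : Nat, 1 ≤ m →
    ((List.range m).map (gRow rc i)).sum
      = 2 + T rc (min rc.length (i + m)) - T rc (i + 1 - m) - rc.getD i 0 := by
  intro m hm
  induction m, hm using Nat.le_induction with
  | base =>
    have h1 : min rc.length (i + 1) = i + 1 := by omega
    have h2 : i + 1 - 1 = i := by omega
    rw [h1, h2, T_succ rc i hi]
    simp [gRow]
    ring
  | succ m hm ih =>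
    rw [List.range_succ, List.map_append, List.sum_append, ih]
    have hg : (List.map (gRow rc i) [m]).sum
        = (if m ≤ i then rc.getD (i - m) 0 else 0) +
          (if i + m < rc.length then rc.getD (i + m) 0 else 0) := by
      simp [gRow, Nat.one_le_iff_ne_zero.mp hm]
    rw [hg]
    have hhi : T rc (min rc.length (i + (m+1)))
        = T rc (min rc.length (i + m)) + (if i + m < rc.length then rc.getD (i + m) 0 else 0) := by
      by_cases h : i + m < rc.length
      · rw [if_pos h]
        have : min rc.length (i + m) = i + m := by omega
        have h2 : min rc.length (i + (m+1)) = (i + m) + 1 := by omega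
        rw [this, h2, T_succ rc (i+m) h]
      · rw [if_neg h]
        have : min rc.length (i + m) = rc.length := by omega
        have h2 : min rc.length (i + (m+1)) = rc.length := by omega
        rw [this, h2, add_zero]
    have hlo : T rc (i + 1 - m)
        = T rc (i + 1 - (m+1)) + (if m ≤ i then rc.getD (i - m) 0 else 0) := by
      by_cases h : m ≤ i
      · rw [if_pos h]
        have h1 : i + 1 - m = (i - m) + 1 := by omega
        have h2 : i + 1 - (m+1) = i - m := by omega
        rw [h1, h2, T_succ rc (i - m) (by omega)]
      · rw [if_neg h]
        have h1 : i + 1 - m = 0 := by omega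
        have h2 : i + 1 - (m+1) = 0 := by omega
        rw [h1, h2, add_zero]
    rw [hhi, hlo]
    ring

theorem getD_map_row (arr : List String) (k : Nat) (hk : k < arr.length) :
    (arr.map rowCountP).getD k 0 = rowCountP (arr.getD k "") := by
  rw [List.getD_eq_getElem?_getD, List.getElem?_map,
      List.getElem?_eq_getElem hk, List.getD_eq_getElem?_getD, List.getElem?_eq_getElem hk]
  rfl

theorem countPerson_eq (arr : List String) : countPerson arr = (arr.map rowCountP).sum := by
  unfold countPerson
  rw [PySem.List.foldl_congr_mem arr _ (fun acc s => acc + rowCountP s) 0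
      (by intro acc s _; exact killPerson_eq s.toList acc)]
  rw [PySem.List.foldl_add arr rowCountP 0]
  simp

theorem A_eq (arr : List String) :
    survivors arr = (arr.map rowCountP).sum - ((List.range arr.length).map (K arr)).sum := by
  unfold survivors
  simp only []
  rw [countPerson_eq]
  congr 1
  rw [PySem.List.foldl_congr_mem _ _ (fun acc i => acc + K arr i) 0 ?step]
  · rw [PySem.List.foldl_add]; simp
  intro acc i hi
  rw [List.mem_range] at hi
  change _ = acc + K arr i
  set row := arr.getD i "" with hrow
  set p := containInteger row.toList 0 with hp
  have hfst := ci_fst row.toList 0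
  cases hf : row.toList.find? (fun c => decide ('1' ≤ c ∧ c ≤ '9')) with
  | none =>
    rw [hf] at hfst
    have : p.1 = -1 := hfst
    rw [if_neg (by simp [this])]
    have hK : K arr i = 0 := by unfold K radiusOf; rw [hf]; simp
    rw [hK, add_zero]
  | some c =>
    rw [hf] at hfst
    have hdig : 49 ≤ c.toNat ∧ c.toNat ≤ 57 := by
      have hp' := List.find?_some hf
      rw [digit_pred] at hp'
      exact of_decide_eq_true hp'
    have hfst1 : p.1 = (c.toNat : Int) - 48 := hfst
    have hne : p.1 ≠ -1 := by rw [hfst1]; omega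
    rw [if_pos hne]
    have hbd := ci_bounds row.toList 0 hne
    rw [← hp] at hbd
    set m : Nat := p.1.toNat with hm
    have hm1 : 1 ≤ m := by rw [hm, hfst1]; omega
    -- rewrite the inner loop pointwise to gRow
    have hinner : ∀ (acc2 : Int), ∀ j ∈ List.range m,
        (if j ≠ 0 then
          let acc3 := if (i : Int) - (j : Int) ≥ 0 then killPerson (arr.getD (i - j) "").toList acc2 else acc2
          if i + j < arr.length then killPerson (arr.getD (i + j) "").toList acc3 else acc3
        else
          let acc3 := if p.2 - (j : Int) ≥ 0 then acc2 + 1 else acc2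
          if p.2 + (j : Int) < (row.toList.length : Int) then acc3 + 1 else acc3)
        = acc2 + gRow (arr.map rowCountP) i j := by
      intro acc2 j hj
      by_cases hj0 : j = 0
      · subst hj0
        simp only [ne_eq, not_true_eq_false, if_false, Nat.cast_zero, sub_zero, add_zero]
        rw [if_pos (by omega), if_pos (by omega)]
        simp [gRow]
        ring
      · rw [if_pos hj0]
        have hsub : ((i : Int) - (j : Int) ≥ 0) ↔ j ≤ i := by omega
        have glen : (arr.map rowCountP).length = arr.length := by simp
        have hcnt : ∀ k : Nat, k < arr.length →
            ((arr.getD k "").toList.count 'P' : Int) = (arr.map rowCountP).getD k 0 := by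
          intro k hk; rw [getD_map_row arr k hk]; rfl
        simp only [killPerson_eq, gRow]
        rw [if_neg hj0]
        by_cases hle : j ≤ i
        · rw [if_pos (hsub.mpr hle), hcnt (i - j) (by omega), if_pos hle]
          by_cases hup : i + j < arr.length
          · rw [if_pos hup, hcnt (i + j) hup,
                if_pos (by omega : i + j < (arr.map rowCountP).length)]
            ring
          · rw [if_neg hup,
                if_neg (by omega : ¬ i + j < (arr.map rowCountP).length)]
            ring
        · rw [if_neg (by omega : ¬ ((i : Int) - (j : Int) ≥ 0)), if_neg hle]
          by_cases hup : i + j < arr.length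
          · rw [if_pos hup, hcnt (i + j) hup,
                if_pos (by omega : i + j < (arr.map rowCountP).length)]
            ring
          · rw [if_neg hup,
                if_neg (by omega : ¬ i + j < (arr.map rowCountP).length)]
            ring
    rw [PySem.List.foldl_congr_mem _ _ (fun acc2 j => acc2 + gRow (arr.map rowCountP) i j) acc hinner]
    rw [PySem.List.foldl_add]
    rw [sumG (arr.map rowCountP) i (by simpa using hi) m hm1]
    unfold K radiusOf
    rw [hf]
    have : ((c.toNat : Int) - 48) ≠ 0 := by omega
    rw [if_pos this]
    have hmt : ((c.toNat : Int) - 48).toNat = m := by rw [hm, hfst1]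
    rw [hmt]
    have glen : (arr.map rowCountP).length = arr.length := by simp
    rw [glen]

theorem B_eq (arr : List String) :
    survivors_alt arr = (arr.map rowCountP).sum - ((List.range arr.length).map (K arr)).sum := by
  unfold survivors_alt
  simp only []
  have glen : (arr.map rowCountP).length = arr.length := by simp
  have hfull : PySem.List.pyGetD (buildPre (arr.map rowCountP)) (arr.length : Int) 0
      = (arr.map rowCountP).sum := by
    rw [PySem.List.pyGetD_natCast, pre_getD _ _ (by omega), T]
    rw [List.take_of_length_le (by omega)]
  rw [hfull]
  congr 1
  rw [PySem.List.enumerate_eq_map_pyRange arr "", List.foldl_map]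
  rw [PySem.List.pyRange_one, List.foldl_map]
  simp only [Int.sub_zero, Int.toNat_natCast, Int.zero_add, PySem.List.len]
  rw [PySem.List.foldl_congr_mem _ _ (fun acc k => acc + K arr k) 0 ?step]
  · rw [PySem.List.foldl_add]; simp
  intro acc k hk
  rw [List.mem_range] at hk
  change _ = acc + K arr k
  have hget : PySem.List.pyGetD arr (k : Int) "" = arr.getD k "" := PySem.List.pyGetD_natCast arr k ""
  rw [hget]
  cases hf : (arr.getD k "").toList.find? (fun c => decide ('1' ≤ c ∧ c ≤ '9')) with
  | none =>
    have hK : K arr k = 0 := by unfold K radiusOf; rw [hf]; simp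
    rw [hK]
    simp only []
    rw [if_neg (by simp)]
    omega
  | some c =>
    have hdig : 49 ≤ c.toNat ∧ c.toNat ≤ 57 := by
      have hp' := List.find?_some hf
      rw [digit_pred] at hp'
      exact of_decide_eq_true hp'
    have hrad : radiusOf (arr.getD k "") = (c.toNat : Int) - 48 := by unfold radiusOf; rw [hf]
    simp only []
    rw [if_pos (by omega : ((c.toNat : Int) - 48) ≠ 0)]
    have hhi : PySem.List.pyGetD (buildPre (arr.map rowCountP)) (min (arr.length : Int) ((k : Int) + ((c.toNat : Int) - 48))) 0
        = T (arr.map rowCountP) (min arr.length (k + ((c.toNat : Int) - 48).toNat)) := by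
      rw [show (min (arr.length : Int) ((k : Int) + ((c.toNat : Int) - 48)))
            = ((min arr.length (k + ((c.toNat : Int) - 48).toNat) : Nat) : Int) by omega,
          PySem.List.pyGetD_natCast, pre_getD _ _ (by omega)]
    have hlo : PySem.List.pyGetD (buildPre (arr.map rowCountP)) (max 0 ((k : Int) - ((c.toNat : Int) - 48) + 1)) 0
        = T (arr.map rowCountP) (k + 1 - ((c.toNat : Int) - 48).toNat) := by
      rw [show (max 0 ((k : Int) - ((c.toNat : Int) - 48) + 1))
            = ((k + 1 - ((c.toNat : Int) - 48).toNat : Nat) : Int) by omega,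
          PySem.List.pyGetD_natCast, pre_getD _ _ (by omega)]
    have hrc : PySem.List.pyGetD (arr.map rowCountP) (k : Int) 0 = (arr.map rowCountP).getD k 0 :=
      PySem.List.pyGetD_natCast _ k 0
    rw [hhi, hlo, hrc]
    unfold K
    rw [hrad, if_pos (by omega : ((c.toNat : Int) - 48) ≠ 0)]
    ring

-- ===== VERDICT (by name: the statement is the Claim_ definition above) =====
theorem survivors_spec : Claim_equal_survivors := by
  intro arr _
  unfold Spec_survivors
  rw [A_eq, B_eq]
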